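-- pv_equiv track=rewrite | github.com/lllana/Python-Practice | Practice/part_sum.py | parts_sums
-- ===== SOURCE A (Python) =====
-- def parts_sums(ls):
--
--     prime_list = ls
--     result = [sum(ls)]
--
--     if not prime_list:
--            return result
--
--     else:
--         for i in range(len(prime_list)-1):
--             prime_list.pop(0)
--             result.append(sum(prime_list))
--
--         result.append(0)
--
--     return result
-- ===== SOURCE B (Python) =====
-- def parts_sums(ls):
--     # one reverse pass with a running suffix sum (A is O(n^2); note A also
--     # empties ls in place, B does not mutate it -- return value is identical)
--     acc = 0
--     out = [0]
--     for x in reversed(ls):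
--         acc += x
--         out.append(acc)
--     out.reverse()
--     return out
-- ===== Notes on version B (the rewrite author's own statement) =====
-- stated objective: faster
-- what changed: replaces the pop-and-resum loop (recomputing sum(ls) after each pop) with a single reverse pass keeping a running suffix-sum accumulator; B also does not mutate the input list
import Mathlib
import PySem

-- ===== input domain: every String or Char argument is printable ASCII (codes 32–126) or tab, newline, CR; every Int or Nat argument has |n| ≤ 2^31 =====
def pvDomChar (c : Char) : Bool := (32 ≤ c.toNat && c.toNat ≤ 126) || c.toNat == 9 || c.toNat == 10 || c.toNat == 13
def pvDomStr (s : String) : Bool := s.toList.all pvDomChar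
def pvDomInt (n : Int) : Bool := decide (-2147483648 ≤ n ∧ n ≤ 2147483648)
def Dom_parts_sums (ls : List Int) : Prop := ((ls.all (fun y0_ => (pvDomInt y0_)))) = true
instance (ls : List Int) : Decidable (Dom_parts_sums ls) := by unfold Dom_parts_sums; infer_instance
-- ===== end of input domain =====

-- B computes the same return value in one reverse pass with a running suffix-sum
-- accumulator instead of A's pop-and-resum loop; A also empties ls in place
-- (caller-visible mutation), B does not — the equivalence is about the return value.

-- ===== PORT A =====
-- prime_list.pop(0) is ported as .tail: inside the loop prime_list is always
-- nonempty (the loop runs len-1 times), so .tail is exact there.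
def parts_sums (ls : List Int) : List Int :=
  let prime_list := ls
  let result := [ls.sum]
  if prime_list = [] then result
  else
    let st := (PySem.List.pyRange 0 (prime_list.length - 1) 1).foldl
      (fun (st : List Int × List Int) _ =>
        let pl := st.1.tail
        (pl, st.2 ++ [pl.sum])) (prime_list, result)
    st.2 ++ [0]

-- ===== PORT B =====
def parts_sums_alt (ls : List Int) : List Int :=
  let st := ls.reverse.foldl
    (fun (st : Int × List Int) x => (st.1 + x, st.2 ++ [st.1 + x])) (0, [0])
  st.2.reverse

-- ===== PRECONDITION & SPEC =====
def Spec_parts_sums (ls : List Int) (out : List Int) : Prop := out = parts_sums_alt ls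
instance (ls : List Int) (out : List Int) : Decidable (Spec_parts_sums ls out) := by unfold Spec_parts_sums; infer_instance

-- ===== CLAIM (what is proved, stated in full; the proofs are below) =====
def Claim_equal_parts_sums : Prop := ∀ (ls : List Int), Dom_parts_sums ls → Spec_parts_sums ls (parts_sums ls)

-- ===== LEMMAS AND PROOFS =====

-- the common reference value: all suffix sums followed by a trailing 0
def pvSpec (ls : List Int) : List Int :=
  (List.range ls.length).map (fun i => (ls.drop i).sum) ++ [0]

theorem pvSpec_cons (x : Int) (xs : List Int) :
    pvSpec (x :: xs) = (x + xs.sum) :: pvSpec xs := by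
  simp [pvSpec, List.range_succ_eq_map, List.map_map, Function.comp]

-- A's loop, run k times from state (pl, res)
theorem loopA (k : Nat) (pl res : List Int) :
    (PySem.List.pyRange 0 k 1).foldl
      (fun (st : List Int × List Int) _ =>
        let p := st.1.tail
        (p, st.2 ++ [p.sum])) (pl, res)
    = (pl.drop k, res ++ (List.range k).map (fun i => (pl.drop (i+1)).sum)) := by
  induction k with
  | zero => simp [PySem.List.pyRange]
  | succ n ih =>
      have h : (PySem.List.pyRange 0 (↑(n+1)) 1)
          = PySem.List.pyRange 0 (↑n) 1 ++ [(n : Int)] := by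
        simp [PySem.List.pyRange_one, List.range_succ]
      rw [h, List.foldl_append, ih]
      simp [List.range_succ, List.tail_drop]

theorem a_eq_spec (ls : List Int) : parts_sums ls = pvSpec ls := by
  cases ls with
  | nil => simp [parts_sums, pvSpec]
  | cons x xs =>
      simp only [parts_sums]
      rw [if_neg (by simp)]
      have h2 : (((x :: xs).length : Int) - 1) = (xs.length : Int) := by
        simp
      rw [h2, loopA]
      simp [pvSpec, List.range_succ_eq_map, List.map_map, Function.comp]

theorem b_fold (ls : List Int) :
    ls.foldr (fun x (st : Int × List Int) => (st.1 + x, st.2 ++ [st.1 + x])) (0, [0])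
      = (ls.sum, (pvSpec ls).reverse) := by
  induction ls with
  | nil => simp [pvSpec]
  | cons x xs ih =>
      rw [List.foldr_cons, ih, pvSpec_cons]
      simp [add_comm]

theorem b_eq_spec (ls : List Int) : parts_sums_alt ls = pvSpec ls := by
  simp only [parts_sums_alt, List.foldl_reverse]
  rw [b_fold]
  simp

-- ===== VERDICT (by name: the statement is the Claim_ definition above) =====
theorem parts_sums_spec : Claim_equal_parts_sums := by
  intro ls _
  unfold Spec_parts_sums
  rw [a_eq_spec, b_eq_spec]
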